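-- pv_equiv track=rewrite | github.com/pypi-data/pypi-mirror-401 | packages/stanlogic/stanlogic-2.1.0.tar.gz/stanlogic-2.1.0/src/stanlogic/BoolMin2D.py | _term_to_verilog
-- ===== SOURCE A (Python) =====
-- def _term_to_verilog(term):
--     """Convert SOP term to Verilog syntax (e.g., "x1x2'x3" -> "x1 & ~x2 & x3")"""
--     if not term:
--         return "1'b1"
--
--     verilog_parts = []
--     i = 0
--     while i < len(term):
--         if term[i] == 'x':
--             # Extract variable number
--             var_num = ""
--             i += 1
--             while i < len(term) and term[i].isdigit():
--                 var_num += term[i]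
--                 i += 1
--
--             # Check for complement
--             if i < len(term) and term[i] == "'":
--                 verilog_parts.append(f"~x{var_num}")
--                 i += 1
--             else:
--                 verilog_parts.append(f"x{var_num}")
--         else:
--             i += 1
--
--     return " & ".join(verilog_parts) if verilog_parts else "1'b1"
-- ===== SOURCE B (Python) =====
-- def _term_to_verilog(term):
--     parts = []
--     for chunk in term.split('x')[1:]:
--         j = next((k for k, c in enumerate(chunk) if not c.isdigit()), len(chunk))
--         rest = chunk[j:]
--         neg = "~" if rest[:1] == "'" else ""
--         parts.append(f"{neg}x{chunk[:j]}")
--     return " & ".join(parts) if parts else "1'b1"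
-- ===== Notes on version B (the rewrite author's own statement) =====
-- stated objective: faster
-- what changed: Replaced A's manual index-based while-loop scan (inner digit-collecting loop plus apostrophe lookahead) by splitting the term on the variable marker and mapping each chunk to its Verilog literal via its digit prefix.
import Mathlib
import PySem

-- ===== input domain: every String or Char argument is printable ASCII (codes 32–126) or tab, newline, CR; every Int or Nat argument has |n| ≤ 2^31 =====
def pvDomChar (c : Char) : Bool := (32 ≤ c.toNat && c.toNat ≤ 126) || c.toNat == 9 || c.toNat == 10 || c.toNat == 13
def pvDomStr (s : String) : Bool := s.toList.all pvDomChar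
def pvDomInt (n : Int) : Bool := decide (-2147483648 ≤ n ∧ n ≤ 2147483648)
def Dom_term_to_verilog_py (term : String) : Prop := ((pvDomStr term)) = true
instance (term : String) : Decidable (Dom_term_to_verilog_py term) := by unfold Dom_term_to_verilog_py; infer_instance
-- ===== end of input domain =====

-- B replaces A's manual index-based character scan by a split-on-the-variable-marker plus per-chunk map (measured faster: the scan moves into C-level str.split).


-- ===== PORT A =====
-- inner while loop of A: collect the digit prefix into var_num, return (var_num, remainder)
def pvANum : List Char → List Char × List Char
  | [] => ([], [])
  | c :: t =>
    if PySem.Chars.isdigit c then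
      let p := pvANum t
      (c :: p.1, p.2)
    else ([], c :: t)

-- the remainder pvANum returns is a suffix: needed for pvALoop's termination
theorem pvANum_snd_len : ∀ t : List Char, (pvANum t).2.length ≤ t.length := by
  intro t
  induction t with
  | nil => simp [pvANum]
  | cons c t ih => by_cases h : PySem.Chars.isdigit c <;> simp [pvANum, h] <;> omega

-- A's outer while loop over the remaining characters, with the verilog_parts accumulator
def pvALoop : List Char → List (List Char) → List (List Char)
  | [], parts => parts
  | c :: rest, parts =>
    if c = 'x' then
      match h : pvANum rest with
      | (num, []) => parts ++ [['x'] ++ num]          -- i = len(term): the loop exits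
      | (num, q :: rest'') =>
        if q = '\'' then pvALoop rest'' (parts ++ [['~', 'x'] ++ num])
        else pvALoop (q :: rest'') (parts ++ [['x'] ++ num])
    else pvALoop rest parts
  termination_by cs _ => cs.length
  decreasing_by
  · have := pvANum_snd_len rest
    rw [h] at this
    simp at this ⊢
    omega
  · have := pvANum_snd_len rest
    rw [h] at this
    simp at this ⊢
    omega
  · simp

def term_to_verilog_py (term : String) : String :=
  if term.toList = [] then "1'b1"      -- `if not term`
  else
    let parts := pvALoop term.toList []
    if parts = [] then "1'b1" else String.mk (PySem.Chars.join [' ', '&', ' '] parts)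

-- ===== PORT B =====
-- per-chunk body of B's for loop: digit prefix chunk[:j], complement test on chunk[j:][:1]
def pvChunkPart (chunk : List Char) : List Char :=
  let j := chunk.findIdx (fun c => !PySem.Chars.isdigit c)   -- next((k for k,c in enumerate(chunk) if not c.isdigit()), len(chunk))
  let rest := chunk.drop j                                    -- chunk[j:]  (exact: 0 ≤ j)
  let neg : List Char := if rest.take 1 = ['\''] then ['~'] else []   -- rest[:1] == "'"
  neg ++ 'x' :: chunk.take j                                  -- f"{neg}x{chunk[:j]}"

def term_to_verilog_py_alt (term : String) : String :=
  let parts := ((PySem.Chars.splitOn term.toList ['x']).tail).map pvChunkPart   -- term.split('x')[1:]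
  if parts = [] then "1'b1" else String.mk (PySem.Chars.join [' ', '&', ' '] parts)

-- ===== PRECONDITION & SPEC =====
def Spec_term_to_verilog_py (term : String) (out : String) : Prop := out = term_to_verilog_py_alt term
instance (term : String) (out : String) : Decidable (Spec_term_to_verilog_py term out) := by unfold Spec_term_to_verilog_py; infer_instance

-- ===== CLAIM (what is proved, stated in full; the proofs are below) =====
def Claim_equal_term_to_verilog_py : Prop := ∀ (term : String), Dom_term_to_verilog_py term → Spec_term_to_verilog_py term (term_to_verilog_py term)

-- ===== LEMMAS AND PROOFS =====

-- proof-side normal form of split-on-'x'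
def pvSplitX : List Char → List (List Char)
  | [] => [[]]
  | c :: t => if c = 'x' then [] :: pvSplitX t else (pvSplitX t).modifyHead (c :: ·)

theorem pvSplitX_ne_nil (l : List Char) : pvSplitX l ≠ [] := by
  induction l with
  | nil => simp [pvSplitX]
  | cons c t ih =>
    by_cases h : c = 'x' <;> simp [pvSplitX, h]
    cases hp : pvSplitX t with
    | nil => exact absurd hp ih
    | cons a l' => simp

theorem pvSplitX_go_eq : ∀ (fuel : Nat) (l cur : List Char) (acc : List (List Char)),
    l.length < fuel →
    PySem.Chars.splitOn.go ['x'] fuel l cur acc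
      = acc.reverse ++ (pvSplitX l).modifyHead (cur.reverse ++ ·) := by
  intro fuel
  induction fuel with
  | zero => intro l cur acc h; omega
  | succ f ih =>
    intro l cur acc h
    cases l with
    | nil => simp [PySem.Chars.splitOn.go, pvSplitX, List.modifyHead]
    | cons c rest =>
      by_cases hc : c = 'x'
      · subst hc
        rw [PySem.Chars.splitOn.go]
        simp [List.isPrefixOf]
        rw [ih rest [] (cur.reverse :: acc) (by simp at h; omega)]
        simp [pvSplitX]
        cases hp : pvSplitX rest with
        | nil => exact absurd hp (pvSplitX_ne_nil rest)
        | cons a l' => simp [List.modifyHead]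
      · rw [PySem.Chars.splitOn.go]
        simp [List.isPrefixOf, Ne.symm hc]
        rw [ih rest (c :: cur) acc (by simp at h; omega)]
        simp [pvSplitX, hc]
        cases hp : pvSplitX rest with
        | nil => exact absurd hp (pvSplitX_ne_nil rest)
        | cons a l' => simp [List.modifyHead]

theorem pvSplitOn_x (l : List Char) : PySem.Chars.splitOn l ['x'] = pvSplitX l := by
  rw [PySem.Chars.splitOn, pvSplitX_go_eq (l.length + 1) l [] [] (by omega)]
  cases hp : pvSplitX l with
  | nil => exact absurd hp (pvSplitX_ne_nil l)
  | cons a l' => simp [List.modifyHead]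

-- pvANum decomposes its input: an all-digit prefix and a remainder whose head is not a digit
theorem pvANum_facts : ∀ t : List Char,
    (∀ c ∈ (pvANum t).1, PySem.Chars.isdigit c = true) ∧
    t = (pvANum t).1 ++ (pvANum t).2 ∧
    (∀ q t', (pvANum t).2 = q :: t' → PySem.Chars.isdigit q = false) := by
  intro t
  induction t with
  | nil => simp [pvANum]
  | cons c t ih =>
    by_cases h : PySem.Chars.isdigit c
    · simp only [pvANum, h, if_true]
      refine ⟨?_, ?_, ?_⟩
      · intro d hd
        rcases List.mem_cons.mp hd with rfl | hd
        · exact h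
        · exact ih.1 d hd
      · simpa using ih.2.1
      · exact ih.2.2
    · simp [pvANum, h]

theorem pvDigit_ne_x {c : Char} (h : PySem.Chars.isdigit c = true) : c ≠ 'x' := by
  intro rfl
  simp [PySem.Chars.isdigit] at h

theorem pvSplitX_append (pre : List Char) :
    ∀ t, (∀ c ∈ pre, c ≠ 'x') → pvSplitX (pre ++ t) = (pvSplitX t).modifyHead (pre ++ ·) := by
  induction pre with
  | nil =>
    intro t _
    cases hp : pvSplitX t with
    | nil => exact absurd hp (pvSplitX_ne_nil t)
    | cons a l' => simp [List.modifyHead, hp]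
  | cons c pre ih =>
    intro t hpre
    have hc : c ≠ 'x' := hpre c (by simp)
    simp only [List.cons_append, pvSplitX, hc, if_false]
    rw [ih t (fun d hd => hpre d (by simp [hd]))]
    cases hp : pvSplitX t with
    | nil => exact absurd hp (pvSplitX_ne_nil t)
    | cons a l' => simp [List.modifyHead]

-- B's chunk body on a chunk shaped digit-prefix ++ remainder-not-starting-with-a-digit
theorem pvChunkPart_digits (num rest0 : List Char)
    (hnum : ∀ c ∈ num, PySem.Chars.isdigit c = true)
    (hr : ∀ q t', rest0 = q :: t' → PySem.Chars.isdigit q = false) :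
    pvChunkPart (num ++ rest0) = (if rest0.take 1 = ['\''] then ['~'] else []) ++ 'x' :: num := by
  have hidx : (num ++ rest0).findIdx (fun c => !PySem.Chars.isdigit c) = num.length := by
    induction num with
    | nil =>
      cases rest0 with
      | nil => simp
      | cons q t' => simp [List.findIdx_cons, hr q t' rfl]
    | cons c num ih =>
      have hc := hnum c (by simp)
      simp only [List.cons_append, List.findIdx_cons, hc, Bool.not_true, List.length_cons]
      rw [ih (fun d hd => hnum d (by simp [hd]))]
      rfl
  simp only [pvChunkPart, hidx]
  rw [List.take_left, List.drop_left]

theorem pvALoop_eq : ∀ (n : Nat) (cs : List Char) (parts : List (List Char)),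
    cs.length ≤ n →
    pvALoop cs parts = parts ++ ((pvSplitX cs).tail).map pvChunkPart := by
  intro n
  induction n with
  | zero =>
    intro cs parts h
    have : cs = [] := by cases cs <;> simp_all
    subst this
    simp [pvALoop, pvSplitX]
  | succ n ih =>
    intro cs parts h
    cases cs with
    | nil => simp [pvALoop, pvSplitX]
    | cons c rest =>
      by_cases hc : c = 'x'
      · subst hc
        obtain ⟨hdig, hsplit, hhead⟩ := pvANum_facts rest
        rw [pvALoop]
        rw [if_pos rfl]
        split
        · -- pvANum rest = (num, [])
          rename_i num heq
          have hnum : ∀ c ∈ num, PySem.Chars.isdigit c = true := by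
            intro d hd; exact hdig d (by rw [heq]; exact hd)
          have hrest : rest = num := by rw [hsplit, heq]; simp
          have : pvSplitX ('x' :: rest) = [] :: pvSplitX rest := by simp [pvSplitX]
          rw [this]
          have : pvSplitX rest = [num] := by
            rw [hrest, show num = num ++ ([] : List Char) by simp,
              pvSplitX_append num [] (fun d hd => pvDigit_ne_x (hnum d hd))]
            simp [pvSplitX, List.modifyHead]
          rw [List.tail_cons, this]
          have hcp : pvChunkPart num = 'x' :: num := by
            simpa using pvChunkPart_digits num [] hnum (by intro q t' h'; simp at h')
          simp [hcp]
        · -- pvANum rest = (num, q :: rest'')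
          rename_i num q rest'' heq
          have hnum : ∀ c ∈ num, PySem.Chars.isdigit c = true := by
            intro d hd; exact hdig d (by rw [heq]; exact hd)
          have hq : PySem.Chars.isdigit q = false := hhead q rest'' (by rw [heq])
          have hrest : rest = num ++ q :: rest'' := by rw [hsplit, heq]
          have hlen : rest.length ≤ n := by simp at h; omega
          have htail : pvSplitX ('x' :: rest) = [] :: pvSplitX rest := by simp [pvSplitX]
          rw [htail, List.tail_cons]
          by_cases hq' : q = '\''
          · subst hq'
            rw [ih rest'' (parts ++ [['~', 'x'] ++ num])
              (by rw [hrest] at hlen; simp at hlen; omega)]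
            have : pvSplitX rest
                = (pvSplitX rest'').modifyHead ((num ++ ['\'']) ++ ·) := by
              rw [hrest, show num ++ '\'' :: rest'' = (num ++ ['\'']) ++ rest'' by simp]
              exact pvSplitX_append (num ++ ['\'']) rest''
                (by
                  intro d hd
                  rcases List.mem_append.mp hd with hd | hd
                  · exact pvDigit_ne_x (hnum d hd)
                  · simp at hd; subst hd; decide)
            rw [this]
            cases hp : pvSplitX rest'' with
            | nil => exact absurd hp (pvSplitX_ne_nil rest'')
            | cons a l' =>
              simp only [List.modifyHead, List.map_cons, List.tail_cons]
              have : (num ++ ['\'']) ++ a = num ++ '\'' :: a := by simp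
              rw [this, pvChunkPart_digits num ('\'' :: a) hnum
                (by intro q t' h'; cases h'; decide)]
              simp
          · rw [ih (q :: rest'') (parts ++ [['x'] ++ num])
              (by rw [hrest] at hlen; simp at hlen ⊢; omega)]
            have hKnum : pvSplitX rest = (pvSplitX (q :: rest'')).modifyHead (num ++ ·) := by
              rw [hrest]
              exact pvSplitX_append num (q :: rest'') (fun d hd => pvDigit_ne_x (hnum d hd))
            rw [hKnum]
            by_cases hqx : q = 'x'
            · subst hqx
              have hsx : pvSplitX ('x' :: rest'') = [] :: pvSplitX rest'' := by simp [pvSplitX]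
              rw [hsx]
              simp only [List.modifyHead, List.map_cons, List.tail_cons, List.append_nil]
              have hcp : pvChunkPart num = 'x' :: num := by
                simpa using pvChunkPart_digits num [] hnum (by intro q t' h'; simp at h')
              simp [hcp]
            · have hsx : pvSplitX (q :: rest'') = (pvSplitX rest'').modifyHead (q :: ·) := by
                simp [pvSplitX, hqx]
              rw [hsx]
              cases hp : pvSplitX rest'' with
              | nil => exact absurd hp (pvSplitX_ne_nil rest'')
              | cons a l' =>
                simp only [List.modifyHead, List.map_cons, List.tail_cons]
                rw [pvChunkPart_digits num (q :: a) hnum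
                  (by intro q' t' h'; cases h'; exact hq)]
                have : (q :: a).take 1 = [q] := by simp
                simp [this, hq']
      · -- skip a non-'x' character
        have : pvSplitX (c :: rest) = (pvSplitX rest).modifyHead (c :: ·) := by
          simp [pvSplitX, hc]
        rw [pvALoop, if_neg hc, ih rest parts (by simp at h; omega), this]
        cases hp : pvSplitX rest with
        | nil => exact absurd hp (pvSplitX_ne_nil rest)
        | cons a l' => simp [List.modifyHead]

-- ===== VERDICT (by name: the statement is the Claim_ definition above) =====
theorem term_to_verilog_py_spec : Claim_equal_term_to_verilog_py := by
  intro term _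
  unfold Spec_term_to_verilog_py term_to_verilog_py term_to_verilog_py_alt
  rw [pvSplitOn_x]
  by_cases hcs : term.toList = []
  · simp [hcs, pvSplitX]
  · rw [if_neg hcs]
    rw [pvALoop_eq term.toList.length term.toList [] le_rfl]
    simp
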